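-- pv_equiv track=rewrite | github.com/Knowledge-Graph-Hub/kg-registry | util/create_infores_stubs.py | extract_homepage_from_xref
-- ===== SOURCE A (Python) =====
-- from typing import Dict, List, Set
--
-- def extract_homepage_from_xref(xrefs: List[str]) -> str:
--     """Extract a homepage URL from xref list."""
--     if not xrefs:
--         return ''
--
--     # Prefer https URLs
--     https_urls = [x for x in xrefs if x.startswith('https://')]
--     if https_urls:
--         return https_urls[0]
--
--     # Fall back to http
--     http_urls = [x for x in xrefs if x.startswith('http://')]
--     if http_urls:
--         return http_urls[0]
--
--     return xrefs[0] if xrefs else ''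
-- ===== SOURCE B (Python) =====
-- def extract_homepage_from_xref(xrefs):
--     """Extract a homepage URL from xref list (single pass)."""
--     first_http = None
--     for x in xrefs:
--         if x.startswith('https://'):
--             return x
--         if first_http is None and x.startswith('http://'):
--             first_http = x
--     if first_http is not None:
--         return first_http
--     return xrefs[0] if xrefs else ''
-- ===== Notes on version B (the rewrite author's own statement) =====
-- stated objective: alternative
-- what changed: Replaces A's three full scans (two filter passes plus a head fallback) by one early-exit pass keeping only the first http URL seen in an accumulator.
import Mathlib
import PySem

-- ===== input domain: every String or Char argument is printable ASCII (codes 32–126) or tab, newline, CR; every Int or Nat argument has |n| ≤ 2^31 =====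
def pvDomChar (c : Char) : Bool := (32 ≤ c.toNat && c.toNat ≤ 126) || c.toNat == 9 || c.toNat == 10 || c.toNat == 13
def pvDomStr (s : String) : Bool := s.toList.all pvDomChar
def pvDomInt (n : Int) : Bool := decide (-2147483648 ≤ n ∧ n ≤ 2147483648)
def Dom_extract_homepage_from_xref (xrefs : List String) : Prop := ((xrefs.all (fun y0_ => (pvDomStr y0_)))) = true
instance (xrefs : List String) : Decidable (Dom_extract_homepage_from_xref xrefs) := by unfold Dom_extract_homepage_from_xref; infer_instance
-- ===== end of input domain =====

-- B replaces A's three scans by one early-exit pass with a first-http accumulator (alternative decomposition).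
-- ===== PORT A =====
def extract_homepage_from_xref (xrefs : List String) : String :=
  if xrefs = [] then "" else
  let https_urls := xrefs.filter (fun x => PySem.Str.startswith x "https://")
  if https_urls ≠ [] then https_urls.head! else
  let http_urls := xrefs.filter (fun x => PySem.Str.startswith x "http://")
  if http_urls ≠ [] then http_urls.head! else
  if xrefs ≠ [] then xrefs.head! else ""

-- ===== PORT B =====
-- loop of Source B: returns some x on the first https URL, else the accumulated first http URL (if any)
def extract_homepage_loop : List String → Option String → Option String
  | [], firstHttp => firstHttp
  | x :: rest, firstHttp =>
    if PySem.Str.startswith x "https://" then some x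
    else extract_homepage_loop rest
      (if firstHttp = none ∧ PySem.Str.startswith x "http://" then some x else firstHttp)

def extract_homepage_from_xref_alt (xrefs : List String) : String :=
  match extract_homepage_loop xrefs none with
  | some s => s
  | none => match xrefs with
    | [] => ""
    | y :: _ => y

-- ===== PRECONDITION & SPEC =====
def Spec_extract_homepage_from_xref (xrefs : List String) (out : String) : Prop := out = extract_homepage_from_xref_alt xrefs
instance (xrefs : List String) (out : String) : Decidable (Spec_extract_homepage_from_xref xrefs out) := by unfold Spec_extract_homepage_from_xref; infer_instance

-- ===== CLAIM (what is proved, stated in full; the proofs are below) =====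
def Claim_equal_extract_homepage_from_xref : Prop := ∀ (xrefs : List String), Dom_extract_homepage_from_xref xrefs → Spec_extract_homepage_from_xref xrefs (extract_homepage_from_xref xrefs)

-- ===== LEMMAS AND PROOFS =====

-- The loop's result in terms of the two filters A computes: first https wins, then the
-- incoming accumulator, then the first http in the remaining list.
theorem extract_homepage_loop_eq (xs : List String) (acc : Option String) :
    extract_homepage_loop xs acc =
      match (xs.filter (fun x => PySem.Str.startswith x "https://")).head? with
      | some y => some y
      | none => match acc with
        | some a => some a
        | none => (xs.filter (fun x => PySem.Str.startswith x "http://")).head? := by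
  induction xs generalizing acc with
  | nil => cases acc <;> simp [extract_homepage_loop]
  | cons x rest ih =>
    by_cases hs : PySem.Str.startswith x "https://" = true
    all_goals by_cases hh : PySem.Str.startswith x "http://" = true
    all_goals simp [PySem.Str.startswith] at hs hh
    all_goals cases acc <;> simp [extract_homepage_loop, PySem.Str.startswith, hs, hh, ih]

theorem extract_homepage_eq (xrefs : List String) :
    extract_homepage_from_xref xrefs = extract_homepage_from_xref_alt xrefs := by
  unfold extract_homepage_from_xref extract_homepage_from_xref_alt
  rw [extract_homepage_loop_eq]
  cases xrefs with
  | nil => simp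
  | cons y ys =>
    cases h1 : List.filter (fun x => PySem.Str.startswith x "https://") (y :: ys) with
    | cons a t => simp [h1]
    | nil =>
      cases h2 : List.filter (fun x => PySem.Str.startswith x "http://") (y :: ys) with
      | cons b t => simp [h1, h2]
      | nil => simp [h1, h2]

-- ===== VERDICT (by name: the statement is the Claim_ definition above) =====
theorem extract_homepage_from_xref_spec : Claim_equal_extract_homepage_from_xref := by
  intro xrefs _
  unfold Spec_extract_homepage_from_xref
  exact extract_homepage_eq xrefs
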